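-- pv_equiv track=rewrite | github.com/Renupriyaaa/CRT | IV-SEM/Python/Assignments/M02_Logic_Building_and_patterns/AST05/task.py | number_triangle
-- ===== SOURCE A (Python) =====
-- def number_triangle(n: int) -> str:
--     lines = []
--     for i in range(1, n + 1):
--         row = ""
--         for j in range(1, i + 1):
--             row += str(j)
--         lines.append(row)
--     return "\n".join(lines)
-- ===== SOURCE B (Python) =====
-- def number_triangle(n: int) -> str:
--     lines = []
--     row = ""
--     for i in range(1, n + 1):
--         row += str(i)
--         lines.append(row)
--     return "\n".join(lines)
-- ===== Notes on version B (the rewrite author's own statement) =====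
-- stated objective: simpler
-- what changed: Replaces the nested loop that rebuilds each row from scratch with a single pass maintaining a running row string extended by str(i) each iteration.
import Mathlib
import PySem

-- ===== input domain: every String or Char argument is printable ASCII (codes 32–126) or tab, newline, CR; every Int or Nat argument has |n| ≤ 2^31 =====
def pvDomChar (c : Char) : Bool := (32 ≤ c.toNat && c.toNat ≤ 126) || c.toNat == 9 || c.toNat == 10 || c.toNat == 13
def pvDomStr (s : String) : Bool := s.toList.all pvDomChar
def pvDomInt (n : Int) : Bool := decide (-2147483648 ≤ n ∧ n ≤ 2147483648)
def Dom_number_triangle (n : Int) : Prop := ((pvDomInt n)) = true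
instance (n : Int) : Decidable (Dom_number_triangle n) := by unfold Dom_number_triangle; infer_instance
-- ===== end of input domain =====

-- B replaces A's inner per-row rebuild loop with one pass maintaining a running row (objective: simpler).

-- ===== PORT A =====
-- A: for each i in 1..n rebuild the row "12…i" from scratch with an inner loop, collect, join with "\n".
def number_triangle (n : Int) : String :=
  let lines : List (List Char) :=
    (PySem.List.pyRange 1 (n + 1) 1).foldl
      (fun ls i =>
        ls ++ [(PySem.List.pyRange 1 (i + 1) 1).foldl
                 (fun row j => row ++ PySem.Int.toChars j) []])
      []
  String.ofList (PySem.Chars.join ['\n'] lines)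

-- ===== PORT B =====
-- B: single pass; the running row is extended by str(i) and appended to the lines each step.
def number_triangle_alt (n : Int) : String :=
  let st : List Char × List (List Char) :=
    (PySem.List.pyRange 1 (n + 1) 1).foldl
      (fun st i =>
        let row := st.1 ++ PySem.Int.toChars i
        (row, st.2 ++ [row]))
      ([], [])
  String.ofList (PySem.Chars.join ['\n'] st.2)

-- ===== PRECONDITION & SPEC =====
def Spec_number_triangle (n : Int) (out : String) : Prop := out = number_triangle_alt n
instance (n : Int) (out : String) : Decidable (Spec_number_triangle n out) := by unfold Spec_number_triangle; infer_instance

-- ===== CLAIM (what is proved, stated in full; the proofs are below) =====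
def Claim_equal_number_triangle : Prop := ∀ (n : Int), Dom_number_triangle n → Spec_number_triangle n (number_triangle n)

-- ===== LEMMAS AND PROOFS =====

-- the full row "12…i" as one flatMap
def pvRow (i : Int) : List Char :=
  (PySem.List.pyRange 1 (i + 1) 1).flatMap PySem.Int.toChars

lemma pvRow_succ (m : Nat) :
    pvRow ((m : Int) + 1) = pvRow m ++ PySem.Int.toChars ((m : Int) + 1) := by
  unfold pvRow
  rw [PySem.List.pyRange_one_succ_right (by omega)]
  simp

-- B's fold state over the range 1..m is (row m, the list of rows 1..m)
lemma alt_state (m : Nat) :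
    (PySem.List.pyRange 1 ((m : Int) + 1) 1).foldl
      (fun (st : List Char × List (List Char)) i =>
        let row := st.1 ++ PySem.Int.toChars i
        (row, st.2 ++ [row]))
      ([], [])
    = (pvRow m, (PySem.List.pyRange 1 ((m : Int) + 1) 1).map pvRow) := by
  induction m with
  | zero =>
      simp [pvRow]
  | succ k ih =>
      have hsplit := PySem.List.pyRange_one_succ_right (a := 1) (b := (k : Int) + 1) (by omega)
      push_cast
      rw [hsplit, List.foldl_append, List.map_append, ih]
      simp [pvRow_succ k]

theorem number_triangle_spec : Claim_equal_number_triangle := by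
  intro n _
  unfold Spec_number_triangle number_triangle number_triangle_alt
  dsimp only
  by_cases hn : n ≤ 0
  · rw [PySem.List.pyRange_one_eq_nil (by omega)]
    rfl
  · obtain ⟨m, hm⟩ : ∃ m : Nat, n = (m : Int) := ⟨n.toNat, by omega⟩
    subst hm
    rw [alt_state m, PySem.List.foldl_append_singleton_eq_map, List.nil_append]
    dsimp only
    congr 1
    refine congrArg _ (List.map_congr_left (fun i _ => ?_))
    rw [PySem.List.foldl_append_eq_flatMap]
    simp [pvRow]
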